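-- pv_equiv track=rewrite | github.com/karanshergill/netscout | netscout/utils.py | merge_domain_results
-- ===== SOURCE A (Python) =====
-- from typing import List, Dict, Any
--
-- def merge_domain_results(results_list: List[List[tuple]]) -> List[tuple]:
--     """
--     Merge multiple domain discovery results and remove duplicates.
--
--     Args:
--         results_list: List of result lists, each containing (asn, ip, domains) tuples
--
--     Returns:
--         Merged and deduplicated results
--     """
--     seen_combinations = set()
--     merged_results = []
--
--     for results in results_list:
--         for asn, ip, domains in results:
--             for domain in domains:
--                 combination = (asn, ip, domain)
--                 if combination not in seen_combinations:
--                     seen_combinations.add(combination)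
--                     merged_results.append((asn, ip, [domain]))
--
--     return merged_results
-- ===== SOURCE B (Python) =====
-- def merge_domain_results(results_list):
--     """Flatten, then dedup by repeatedly emitting the head triple and
--     filtering all of its duplicates out of the remainder (no seen-set)."""
--     combos = [(asn, ip, domain)
--               for results in results_list
--               for asn, ip, domains in results
--               for domain in domains]
--     merged = []
--     while combos:
--         first = combos[0]
--         asn, ip, domain = first
--         merged.append((asn, ip, [domain]))
--         combos = [c for c in combos[1:] if c != first]
--     return merged
-- ===== Notes on version B (the rewrite author's own statement) =====
-- stated objective: alternative
-- what changed: A's single interleaved loop maintaining a seen-set and skipping already-seen triples is replaced by flattening to (asn, ip, domain) triples and then deduplicating with no seen structure at all: repeatedly emit the first remaining triple and filter every duplicate of it out of the remainder before continuing.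
import Mathlib
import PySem

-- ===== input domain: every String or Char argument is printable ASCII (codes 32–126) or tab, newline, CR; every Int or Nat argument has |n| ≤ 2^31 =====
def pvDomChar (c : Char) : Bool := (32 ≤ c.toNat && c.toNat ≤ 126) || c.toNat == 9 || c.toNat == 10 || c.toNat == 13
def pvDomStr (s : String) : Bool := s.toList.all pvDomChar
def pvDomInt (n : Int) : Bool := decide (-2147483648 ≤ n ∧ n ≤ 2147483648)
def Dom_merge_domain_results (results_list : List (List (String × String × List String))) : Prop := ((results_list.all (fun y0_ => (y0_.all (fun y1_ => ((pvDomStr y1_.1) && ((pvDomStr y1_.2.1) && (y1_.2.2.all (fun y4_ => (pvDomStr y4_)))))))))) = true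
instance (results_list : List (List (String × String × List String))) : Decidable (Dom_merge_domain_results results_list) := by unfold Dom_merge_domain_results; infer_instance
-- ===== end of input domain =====

-- B replaces A's single interleaved seen-set loop by flatten + filter-based dedup
-- (emit the head triple, filter its duplicates out of the rest) — a different algorithm, same result.


-- ===== PORT A =====
-- A: one pass, maintaining seen_combinations (a set) and merged_results together.
def merge_domain_results (results_list : List (List (String × String × List String))) : List (String × String × List String) :=
  (results_list.foldl
    (fun st results =>
      results.foldl
        (fun st t =>
          t.2.2.foldl
            (fun (st : PySem.Set (String × String × String) × List (String × String × List String)) domain =>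
              let combination := (t.1, t.2.1, domain)
              if st.1.contains combination then st
              else (st.1.add combination, st.2 ++ [(t.1, t.2.1, [domain])]))
            st)
        st)
    (PySem.Set.empty, [])).2

-- ===== PORT B =====
-- B's while loop: emit the head triple, filter its duplicates out of the remainder.
def pvDedupBuild : List (String × String × String) → List (String × String × List String)
  | [] => []
  | c :: rest =>
      (c.1, c.2.1, [c.2.2]) :: pvDedupBuild (rest.filter (fun x => x ≠ c))
termination_by l => l.length
decreasing_by
  simpa using Nat.lt_succ_of_le (Nat.le_trans (List.length_filter_le _ _) (by simp))

-- B: flatten to combination triples, then filter-based dedup building the output directly.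
def merge_domain_results_alt (results_list : List (List (String × String × List String))) : List (String × String × List String) :=
  let combos := results_list.flatMap (fun results =>
    results.flatMap (fun t => t.2.2.map (fun domain => (t.1, t.2.1, domain))))
  pvDedupBuild combos

-- ===== PRECONDITION & SPEC =====
def Spec_merge_domain_results (results_list : List (List (String × String × List String))) (out : List (String × String × List String)) : Prop := out = merge_domain_results_alt results_list
instance (results_list : List (List (String × String × List String))) (out : List (String × String × List String)) : Decidable (Spec_merge_domain_results results_list out) := by unfold Spec_merge_domain_results; infer_instance

-- ===== CLAIM (what is proved, stated in full; the proofs are below) =====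
def Claim_equal_merge_domain_results : Prop := ∀ (results_list : List (List (String × String × List String))), Dom_merge_domain_results results_list → Spec_merge_domain_results results_list (merge_domain_results results_list)

-- ===== LEMMAS AND PROOFS =====

-- A's loop step, over a single combination triple.
def pvStepA (st : PySem.Set (String × String × String) × List (String × String × List String))
    (c : String × String × String) :
    PySem.Set (String × String × String) × List (String × String × List String) :=
  if st.1.contains c then st else (st.1.add c, st.2 ++ [(c.1, c.2.1, [c.2.2])])

-- the seen-set is a prefix of its update
theorem pvPrefix_update {α : Type} [BEq α] (cs : List α) (s : PySem.Set α) :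
    s <+: PySem.Set.update s cs := by
  induction cs generalizing s with
  | nil => simp [PySem.Set.update]
  | cons c cs ih =>
    have h1 : s <+: PySem.Set.add s c := by
      by_cases h : PySem.Set.contains s c <;>
        simp [PySem.Set.add, PySem.Set.contains] at * <;> simp [h]
    have h2 := ih (PySem.Set.add s c)
    simpa [PySem.Set.update] using h1.trans h2

-- main invariant: folding pvStepA over combos yields (update of the seen set,
-- acc ++ the images of the newly seen combinations, in order)
theorem pvFoldA (combos : List (String × String × String))
    (s : PySem.Set (String × String × String)) (acc : List (String × String × List String)) :
    combos.foldl pvStepA (s, acc) =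
      (PySem.Set.update s combos,
       acc ++ ((PySem.Set.update s combos).drop s.length).map (fun c => (c.1, c.2.1, [c.2.2]))) := by
  induction combos generalizing s acc with
  | nil => simp [PySem.Set.update]
  | cons c cs ih =>
    by_cases h : PySem.Set.contains s c
    · have hadd : PySem.Set.add s c = s := by simp [PySem.Set.add, PySem.Set.contains] at h ⊢; simp [h]
      simp only [List.foldl_cons, pvStepA, h, if_true, PySem.Set.update, hadd] at *
      exact ih s acc
    · have hadd : PySem.Set.add s c = s ++ [c] := by
        simp [PySem.Set.add, PySem.Set.contains] at h ⊢; simp [h]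
      have hpre := pvPrefix_update cs (s ++ [c])
      obtain ⟨t, ht⟩ := hpre
      have hupd : PySem.Set.update s (c :: cs) = PySem.Set.update (s ++ [c]) cs := by
        simp [PySem.Set.update, hadd]
      have hdrop1 : (PySem.Set.update (s ++ [c]) cs).drop s.length =
          c :: (PySem.Set.update (s ++ [c]) cs).drop (s ++ [c]).length := by
        rw [← ht]
        simp [List.drop_append]
      simp only [List.foldl_cons, pvStepA, h, hadd]
      rw [if_neg (by simp), ih (s ++ [c]) (acc ++ [(c.1, c.2.1, [c.2.2])]), hupd, hdrop1]
      simp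

-- updating x :: s is x in front of updating s with x filtered out of the input
theorem pvUpdate_cons {α : Type} [BEq α] [LawfulBEq α] [DecidableEq α]
    (l : List α) (s : List α) (x : α) :
    PySem.Set.update (x :: s) l = x :: PySem.Set.update s (l.filter (fun y => y ≠ x)) := by
  induction l generalizing s with
  | nil => simp [PySem.Set.update]
  | cons a l ih =>
    by_cases hax : a = x
    · subst hax
      have hadd : PySem.Set.add (a :: s) a = a :: s := by
        simp [PySem.Set.add, PySem.Set.contains]
      simp only [PySem.Set.update, List.foldl_cons, hadd, List.filter_cons]
      simpa [PySem.Set.update] using ih s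
    · have hadd : PySem.Set.add (x :: s) a = x :: PySem.Set.add s a := by
        by_cases hc : PySem.Set.contains s a <;>
          simp [PySem.Set.add, PySem.Set.contains, hax] <;> split <;> rfl
    -- note contains (x::s) a = contains s a since a ≠ x
      simp only [PySem.Set.update, List.foldl_cons, hadd, List.filter_cons]
      rw [if_pos (by simp [hax])]
      simpa [PySem.Set.update] using ih (PySem.Set.add s a)

-- first-occurrence dedup satisfies the filter recursion
theorem pvOfList_cons (c : String × String × String) (l : List (String × String × String)) :
    PySem.Set.ofList (c :: l) = c :: PySem.Set.ofList (l.filter (fun x => x ≠ c)) := by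
  have h1 : PySem.Set.ofList (c :: l) = PySem.Set.update [c] l := by
    simp [PySem.Set.ofList_eq_foldl, PySem.Set.update, PySem.Set.add, PySem.Set.contains]
  rw [h1, pvUpdate_cons l [] c]
  simp [PySem.Set.ofList_eq_foldl, PySem.Set.update]

-- mapping the output builder over the deduplicated list = B's filter recursion
theorem pvMap_ofList (l : List (String × String × String)) :
    (PySem.Set.ofList l).map (fun c => (c.1, c.2.1, [c.2.2])) = pvDedupBuild l := by
  induction hn : l.length using Nat.strong_induction_on generalizing l with
  | _ n ih =>
    cases l with
    | nil => rw [pvDedupBuild.eq_1]; simp [PySem.Set.ofList_eq_foldl]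
    | cons c rest =>
      rw [pvOfList_cons, pvDedupBuild.eq_2]
      simp only [List.map_cons, List.cons.injEq, true_and]
      exact ih (rest.filter (fun x => x ≠ c)).length
        (by simpa [← hn] using Nat.lt_succ_of_le (List.length_filter_le _ rest))
        _ rfl

theorem merge_eq (results_list : List (List (String × String × List String))) :
    merge_domain_results results_list = merge_domain_results_alt results_list := by
  unfold merge_domain_results merge_domain_results_alt
  have hflat :
      (results_list.flatMap (fun results =>
        results.flatMap (fun t => t.2.2.map (fun domain => (t.1, t.2.1, domain))))).foldl pvStepA
        ((PySem.Set.empty : PySem.Set (String × String × String)), []) =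
      results_list.foldl
        (fun st results =>
          results.foldl
            (fun st t =>
              t.2.2.foldl
                (fun (st : PySem.Set (String × String × String) × List (String × String × List String)) domain =>
                  let combination := (t.1, t.2.1, domain)
                  if st.1.contains combination then st
                  else (st.1.add combination, st.2 ++ [(t.1, t.2.1, [domain])]))
                st)
            st)
        (PySem.Set.empty, []) := by
    rw [List.foldl_flatMap]
    simp only [List.foldl_flatMap, List.foldl_map]
    rfl
  rw [← hflat, pvFoldA, ← pvMap_ofList]
  simp [PySem.Set.update_nil_left, PySem.Set.empty]

-- ===== VERDICT (by name: the statement is the Claim_ definition above) =====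
theorem merge_domain_results_spec : Claim_equal_merge_domain_results := by
  intro results_list _
  unfold Spec_merge_domain_results
  exact merge_eq results_list
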